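-- pv_equiv track=rewrite | github.com/engineer-s-bizzare-adventure/UMa_ia_milos | figuma_sim.py | diagonal_fig_x
-- ===== SOURCE A (Python) =====
-- def diagonal_fig_x(tabuleiro, linha, coluna, peca):
--     diagonais = 0
--     tamanho_min_fig = 3
--     tamanho_fig = len(tabuleiro)
--     if tamanho_fig % 2 == 0: #PARA O X, A DIAGONAL TEM DE SER IMPAR
--         tamanho_fig -= 1
--
--     while (linha + tamanho_fig > len(tabuleiro) or coluna + tamanho_fig > len(tabuleiro) ):
--         tamanho_fig -= 2
--
--     while tamanho_fig >= tamanho_min_fig and diagonais != tamanho_fig: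
--         for i in range(tamanho_fig):
--             if tabuleiro[linha+i][coluna+i] == peca and tabuleiro[linha+i][coluna + tamanho_fig-1-i] == peca:
--                 diagonais+=1
--         if(diagonais == tamanho_fig):
--             return True
--         tamanho_fig -= 2
--         diagonais = 0
--
--     return diagonais == tamanho_fig
-- ===== SOURCE B (Python) =====
-- def diagonal_fig_x(tabuleiro, linha, coluna, peca):
--     n = len(tabuleiro)
--     s = n if n % 2 == 1 else n - 1
--     while linha + s > n or coluna + s > n:
--         s -= 2
--     if s < 3:
--         return False
--     # length of the consecutive run of `peca` along the main diagonal from the corner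
--     L = 0
--     while L < s and tabuleiro[linha + L][coluna + L] == peca:
--         L += 1
--     # a size-t X needs the first t main-diagonal cells (t <= L) plus a full anti-diagonal
--     t = s
--     while t >= 3:
--         if t <= L and all(tabuleiro[linha + i][coluna + t - 1 - i] == peca for i in range(t)):
--             return True
--         t -= 2
--     return False
-- ===== Notes on version B (the rewrite author's own statement) =====
-- stated objective: alternative
-- what changed: A recounts both diagonals with a counter for every candidate size; B computes the consecutive main-diagonal run length L once, then for each odd size t only checks t <= L plus the anti-diagonal cells, separating the prefix computation from a narrower per-size pass.
import Mathlib
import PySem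

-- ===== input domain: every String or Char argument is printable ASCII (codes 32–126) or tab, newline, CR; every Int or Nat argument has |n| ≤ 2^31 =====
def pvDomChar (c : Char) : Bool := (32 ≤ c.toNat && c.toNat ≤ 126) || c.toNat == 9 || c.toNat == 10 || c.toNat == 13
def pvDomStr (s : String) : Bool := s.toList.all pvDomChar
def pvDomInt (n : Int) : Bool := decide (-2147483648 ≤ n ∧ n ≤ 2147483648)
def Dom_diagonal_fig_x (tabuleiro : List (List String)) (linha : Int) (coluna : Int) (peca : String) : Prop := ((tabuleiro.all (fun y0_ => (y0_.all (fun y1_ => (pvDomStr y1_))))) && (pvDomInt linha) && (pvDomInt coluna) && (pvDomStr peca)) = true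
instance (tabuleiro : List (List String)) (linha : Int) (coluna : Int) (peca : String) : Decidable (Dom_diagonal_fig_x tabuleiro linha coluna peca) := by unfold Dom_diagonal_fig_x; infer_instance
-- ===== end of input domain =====

-- B separates the work: one pass measuring the main-diagonal run, then a per-size anti-diagonal-only check (alternative decomposition, same cost).


-- ===== PORT A =====
-- tabuleiro[r][c] with Python index semantics; the default is only reached on inputs excluded by Pre_ (IndexError in Python)
def pvCell (tabuleiro : List (List String)) (r c : Int) : String :=
  (PySem.List.pyGet? ((PySem.List.pyGet? tabuleiro r).getD []) c).getD ""

-- the size-fitting while loop of A; the Nat argument is fuel making the loop total (always sufficient at the call site)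
def pvFitAGo (n linha coluna : Int) : Nat → Int → Int
  | 0, t => t
  | Nat.succ k, t => if linha + t > n ∨ coluna + t > n then pvFitAGo n linha coluna k (t - 2) else t

def pvFitA (n linha coluna t : Int) : Int :=
  pvFitAGo n linha coluna (((linha + t - n) ⊔ (coluna + t - n)).toNat + 1) t

-- A's main while loop, carrying diagonais (d) exactly as the Python does; Nat fuel as above
def pvLoopAGo (tabuleiro : List (List String)) (linha coluna : Int) (peca : String) :
    Nat → Int → Int → Bool
  | 0, t, d => decide (d = t)
  | Nat.succ k, t, d =>
    if 3 ≤ t ∧ d ≠ t then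
      let d' := (PySem.List.pyRange 0 t 1).foldl
        (fun d i => if (pvCell tabuleiro (linha + i) (coluna + i) == peca)
                       && (pvCell tabuleiro (linha + i) (coluna + t - 1 - i) == peca)
                    then d + 1 else d) d
      if d' = t then true else pvLoopAGo tabuleiro linha coluna peca k (t - 2) 0
    else decide (d = t)

def diagonal_fig_x (tabuleiro : List (List String)) (linha : Int) (coluna : Int) (peca : String) : Bool :=
  let n : Int := tabuleiro.length
  let t0 : Int := if n % 2 = 0 then n - 1 else n
  let t1 : Int := pvFitA n linha coluna t0
  pvLoopAGo tabuleiro linha coluna peca (t1.toNat + 1) t1 0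

-- ===== PORT B =====
-- B's size-fitting while loop (same arithmetic, B's own copy), with the same kind of fuel guard
def pvFitBGo (n linha coluna : Int) : Nat → Int → Int
  | 0, s => s
  | Nat.succ k, s => if linha + s > n ∨ coluna + s > n then pvFitBGo n linha coluna k (s - 2) else s

def pvFitB (n linha coluna s : Int) : Int :=
  pvFitBGo n linha coluna (((linha + s - n) ⊔ (coluna + s - n)).toNat + 1) s

-- B's prefix pass: length of the consecutive run of peca on the main diagonal, bounded by s
def pvPrefBGo (tabuleiro : List (List String)) (linha coluna : Int) (peca : String) (s : Int) :
    Nat → Int → Int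
  | 0, L => L
  | Nat.succ k, L =>
    if L < s ∧ pvCell tabuleiro (linha + L) (coluna + L) == peca
    then pvPrefBGo tabuleiro linha coluna peca s k (L + 1) else L

-- B's per-size pass: only the anti-diagonal is scanned
def pvSearchBGo (tabuleiro : List (List String)) (linha coluna : Int) (peca : String) (L : Int) :
    Nat → Int → Bool
  | 0, _ => false
  | Nat.succ k, t =>
    if 3 ≤ t then
      if t ≤ L ∧ (PySem.List.pyRange 0 t 1).all
          (fun i => pvCell tabuleiro (linha + i) (coluna + t - 1 - i) == peca)
      then true else pvSearchBGo tabuleiro linha coluna peca L k (t - 2)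
    else false

def diagonal_fig_x_alt (tabuleiro : List (List String)) (linha : Int) (coluna : Int) (peca : String) : Bool :=
  let n : Int := tabuleiro.length
  let s0 : Int := if n % 2 = 1 then n else n - 1
  let s := pvFitB n linha coluna s0
  if s < 3 then false
  else
    let L := pvPrefBGo tabuleiro linha coluna peca s s.toNat 0
    pvSearchBGo tabuleiro linha coluna peca L (s.toNat + 1) s

-- ===== PRECONDITION & SPEC =====
-- Pre_ excludes inputs on which Python raises IndexError mid-run; because which cells a run reads is
-- data-dependent, the square-board/in-range condition also excludes some ragged boards on which every
-- cell that happens to be read exists and A returns (see the cite in claim.json).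
def Pre_diagonal_fig_x (tabuleiro : List (List String)) (linha : Int) (coluna : Int) (peca : String) : Prop :=
  ((tabuleiro.length : Int) < 3 ∨ linha > (tabuleiro.length : Int) - 3 ∨ coluna > (tabuleiro.length : Int) - 3)
  ∨ ((∀ row ∈ tabuleiro, row.length = tabuleiro.length)
     ∧ -(tabuleiro.length : Int) ≤ linha ∧ -(tabuleiro.length : Int) ≤ coluna)
instance (tabuleiro : List (List String)) (linha : Int) (coluna : Int) (peca : String) : Decidable (Pre_diagonal_fig_x tabuleiro linha coluna peca) := by unfold Pre_diagonal_fig_x; infer_instance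

def pvWitness_diagonal_fig_x : List (List String) × Int × Int × String :=
  ([["x", "a", "x"], ["a", "x", "a"], ["x", "a", "x"]], 0, 0, "x")

def Spec_diagonal_fig_x (tabuleiro : List (List String)) (linha : Int) (coluna : Int) (peca : String) (out : Bool) : Prop := out = diagonal_fig_x_alt tabuleiro linha coluna peca
instance (tabuleiro : List (List String)) (linha : Int) (coluna : Int) (peca : String) (out : Bool) : Decidable (Spec_diagonal_fig_x tabuleiro linha coluna peca out) := by unfold Spec_diagonal_fig_x; infer_instance

-- ===== CLAIM (what is proved, stated in full; the proofs are below) =====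
def Claim_equal_diagonal_fig_x : Prop := ∀ (tabuleiro : List (List String)) (linha : Int) (coluna : Int) (peca : String), Dom_diagonal_fig_x tabuleiro linha coluna peca → Pre_diagonal_fig_x tabuleiro linha coluna peca → Spec_diagonal_fig_x tabuleiro linha coluna peca (diagonal_fig_x tabuleiro linha coluna peca)

-- ===== LEMMAS AND PROOFS =====

theorem pvFit_eq (n linha coluna : Int) (fuel : Nat) (t : Int) :
    pvFitAGo n linha coluna fuel t = pvFitBGo n linha coluna fuel t := by
  induction fuel generalizing t with
  | zero => rfl
  | succ k ih =>
    rw [pvFitAGo, pvFitBGo]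
    split
    · exact ih (t - 2)
    · rfl

theorem pvFit_parity (n linha coluna : Int) (fuel : Nat) (t : Int) (h : t % 2 = 1) :
    pvFitAGo n linha coluna fuel t % 2 = 1 := by
  induction fuel generalizing t with
  | zero => exact h
  | succ k ih =>
    rw [pvFitAGo]
    split
    · exact ih (t - 2) (by omega)
    · exact h

theorem pvCount_eq (p : Int → Bool) (xs : List Int) (d : Int) :
    xs.foldl (fun d i => if p i then d + 1 else d) d = d + (xs.countP p : Int) := by
  induction xs generalizing d with
  | nil => simp
  | cons x xs ih =>
    simp only [List.foldl_cons, List.countP_cons, ih]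
    by_cases h : p x <;> simp [h] <;> push_cast <;> omega

theorem pvPref_spec (tab : List (List String)) (l c : Int) (p : String) (s : Int) (fuel : Nat)
    (L0 : Int) (h0 : 0 ≤ L0) (hfuel : (s - L0).toNat ≤ fuel)
    (hall : ∀ i, 0 ≤ i → i < L0 → pvCell tab (l + i) (c + i) == p) :
    let L := pvPrefBGo tab l c p s fuel L0
    L0 ≤ L ∧ (∀ i, 0 ≤ i → i < L → pvCell tab (l + i) (c + i) == p) ∧
      (L < s → ¬ (pvCell tab (l + L) (c + L) == p)) := by
  induction fuel generalizing L0 with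
  | zero =>
    refine ⟨le_refl _, hall, fun hLs => absurd hfuel (by simp only [pvPrefBGo] at hLs ⊢; omega)⟩
  | succ k ih =>
    rw [pvPrefBGo]
    split
    · rename_i hc
      have := ih (L0 + 1) (by omega) (by omega)
        (by intro i hi0 hi1
            by_cases hiL : i < L0
            · exact hall i hi0 hiL
            · have : i = L0 := by omega
              subst this; exact hc.2)
      exact ⟨by have := this.1; omega, this.2.1, this.2.2⟩
    · rename_i hc
      refine ⟨le_refl _, hall, fun hLs hp => hc ⟨hLs, hp⟩⟩

theorem pvLoop_eq (tab : List (List String)) (l c : Int) (p : String) (s L : Int)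
    (hL : L = pvPrefBGo tab l c p s s.toNat 0) (fuel : Nat) (t : Int)
    (hodd : t % 2 = 1) (hts : t ≤ s) :
    pvLoopAGo tab l c p fuel t 0 = pvSearchBGo tab l c p L fuel t := by
  induction fuel generalizing t with
  | zero =>
    simp only [pvLoopAGo, pvSearchBGo, decide_eq_false_iff_not]
    omega
  | succ k ih =>
    rw [pvLoopAGo, pvSearchBGo]
    by_cases h3 : 3 ≤ t
    · rw [if_pos (show (3 ≤ t ∧ (0:Int) ≠ t) from ⟨h3, by omega⟩), if_pos h3]
      have hpref := pvPref_spec tab l c p s s.toNat 0 (le_refl 0) (by omega)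
        (by intro i h0 h1; omega)
      rw [← hL] at hpref
      have hcount := pvCount_eq
        (fun i => (pvCell tab (l + i) (c + i) == p) && (pvCell tab (l + i) (c + t - 1 - i) == p))
        (PySem.List.pyRange 0 t 1) 0
      have hlen : (PySem.List.pyRange 0 t 1).length = t.toNat := by
        rw [PySem.List.length_pyRange_one]; omega
      have hiff :
          ((PySem.List.pyRange 0 t 1).foldl
            (fun d i => if (pvCell tab (l + i) (c + i) == p)
                         && (pvCell tab (l + i) (c + t - 1 - i) == p) then d + 1 else d) 0 = t)
          ↔ (t ≤ L ∧ (PySem.List.pyRange 0 t 1).all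
                (fun i => pvCell tab (l + i) (c + t - 1 - i) == p) = true) := by
        rw [hcount]
        have hle := List.countP_le_length (l := PySem.List.pyRange 0 t 1)
          (p := fun i => (pvCell tab (l + i) (c + i) == p) && (pvCell tab (l + i) (c + t - 1 - i) == p))
        rw [hlen] at hle
        constructor
        · intro hEq
          have hcp : (PySem.List.pyRange 0 t 1).countP
              (fun i => (pvCell tab (l + i) (c + i) == p) && (pvCell tab (l + i) (c + t - 1 - i) == p))
              = (PySem.List.pyRange 0 t 1).length := by
            rw [hlen]; omega
          rw [List.countP_eq_length] at hcp
          have hall : ∀ i, 0 ≤ i → i < t →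
              (pvCell tab (l + i) (c + i) == p) = true ∧ (pvCell tab (l + i) (c + t - 1 - i) == p) = true := by
            intro i h0 h1
            have := hcp i (by rw [PySem.List.mem_pyRange_one]; omega)
            simpa using this
          constructor
          · by_contra hLt
            have hL0 := hpref.1
            have hmainL := (hall L hL0 (by omega)).1
            exact absurd hmainL (by simpa using hpref.2.2 (by omega))
          · rw [List.all_eq_true]
            intro i hi
            rw [PySem.List.mem_pyRange_one] at hi
            exact (hall i hi.1 hi.2).2
        · rintro ⟨htL, hanti⟩
          rw [List.all_eq_true] at hanti
          have hcp : (PySem.List.pyRange 0 t 1).countP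
              (fun i => (pvCell tab (l + i) (c + i) == p) && (pvCell tab (l + i) (c + t - 1 - i) == p))
              = (PySem.List.pyRange 0 t 1).length := by
            rw [List.countP_eq_length]
            intro i hi
            have hi' := hi
            rw [PySem.List.mem_pyRange_one] at hi'
            have hmain := hpref.2.1 i hi'.1 (by omega)
            have hanti' := hanti i hi
            simp only [Bool.and_eq_true]
            exact ⟨hmain, by simpa using hanti'⟩
          rw [hcp, hlen]; omega
      by_cases hd : (PySem.List.pyRange 0 t 1).foldl
          (fun d i => if (pvCell tab (l + i) (c + i) == p)
                       && (pvCell tab (l + i) (c + t - 1 - i) == p) then d + 1 else d) 0 = t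
      · rw [if_pos hd, if_pos (hiff.mp hd)]
      · rw [if_neg hd, if_neg (fun hc => hd (hiff.mpr hc))]
        exact ih (t - 2) (by omega) (by omega)
    · rw [if_neg (show ¬(3 ≤ t ∧ (0:Int) ≠ t) from fun hc => h3 hc.1), if_neg h3]
      simp only [decide_eq_false_iff_not]
      omega

-- ===== VERDICT (by name: the statement is the Claim_ definition above) =====
theorem diagonal_fig_x_spec : Claim_equal_diagonal_fig_x := by
  intro tab l c p _ _
  unfold Spec_diagonal_fig_x diagonal_fig_x diagonal_fig_x_alt
  simp only []
  have hn : (0 : Int) ≤ (tab.length : Int) := by positivity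
  have ht0 : (if (tab.length : Int) % 2 = 0 then (tab.length : Int) - 1 else (tab.length : Int))
           = (if (tab.length : Int) % 2 = 1 then (tab.length : Int) else (tab.length : Int) - 1) := by
    split <;> split <;> omega
  rw [ht0]
  set s0 : Int := if (tab.length : Int) % 2 = 1 then (tab.length : Int) else (tab.length : Int) - 1 with hs0
  have hs0odd : s0 % 2 = 1 := by rw [hs0]; split <;> omega
  have hfit : pvFitA (tab.length : Int) l c s0 = pvFitB (tab.length : Int) l c s0 := by
    unfold pvFitA pvFitB; exact pvFit_eq _ _ _ _ _
  have hSodd : pvFitA (tab.length : Int) l c s0 % 2 = 1 := by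
    unfold pvFitA; exact pvFit_parity _ _ _ _ _ hs0odd
  rw [← hfit]
  set S := pvFitA (tab.length : Int) l c s0 with hS
  by_cases h3 : S < 3
  · rw [if_pos h3, pvLoopAGo,
      if_neg (show ¬(3 ≤ S ∧ (0:Int) ≠ S) from fun hc => by omega)]
    simp only [decide_eq_false_iff_not]
    omega
  · rw [if_neg h3]
    exact pvLoop_eq tab l c p S _ rfl (S.toNat + 1) S hSodd le_rfl
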